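-- pv_equiv track=rewrite | github.com/henosis-us/project-lantern | main.py | generate_vod_manifest
-- ===== SOURCE A (Python) =====
-- import math
--
-- SEGMENT_DURATION_SEC = 10
--
-- def generate_vod_manifest(duration_seconds: int, token: str):
--     """
--     Generates a complete HLS VOD manifest for the entire duration of the media.
--     This is the correct approach for VOD playback, as it gives the player the
--     full timeline context.
--     """
--     num_segments = math.ceil(duration_seconds / SEGMENT_DURATION_SEC)
--     manifest_lines = [
--         "#EXTM3U",
--         "#EXT-X-VERSION:3",
--         f"#EXT-X-TARGETDURATION:{SEGMENT_DURATION_SEC}",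
--         "#EXT-X-PLAYLIST-TYPE:VOD"
--     ]
--
--     for i in range(num_segments):
--         segment_duration_at_end = min(SEGMENT_DURATION_SEC, duration_seconds - (i * SEGMENT_DURATION_SEC))
--         if segment_duration_at_end <= 0:
--              break
--         manifest_lines.extend([
--             f"#EXTINF:{segment_duration_at_end:.6f},",
--             f"stream{i}.ts?token={token}"
--         ])
--     manifest_lines.append("#EXT-X-ENDLIST")
--     return "\n".join(manifest_lines)
-- ===== SOURCE B (Python) =====
-- SEGMENT_DURATION_SEC = 10
--
-- def generate_vod_manifest(duration_seconds: int, token: str):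
--     lines = [
--         "#EXTM3U",
--         "#EXT-X-VERSION:3",
--         f"#EXT-X-TARGETDURATION:{SEGMENT_DURATION_SEC}",
--         "#EXT-X-PLAYLIST-TYPE:VOD",
--     ]
--     if duration_seconds > 0:
--         num_full, remainder = divmod(duration_seconds, SEGMENT_DURATION_SEC)
--         full_line = f"#EXTINF:{SEGMENT_DURATION_SEC:.6f},"
--         lines += [line for i in range(num_full)
--                   for line in (full_line, f"stream{i}.ts?token={token}")]
--         if remainder > 0:
--             lines.append(f"#EXTINF:{remainder:.6f},")
--             lines.append(f"stream{num_full}.ts?token={token}")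
--     lines.append("#EXT-X-ENDLIST")
--     return "\n".join(lines)
-- ===== Notes on version B (the rewrite author's own statement) =====
-- stated objective: alternative
-- what changed: Replaces A's ceil-count loop with a per-iteration min/break by a positivity guard plus divmod decomposition: duration // 10 full segments emitted by a flat comprehension with a precomputed constant EXTINF line, then one optional remainder segment.
import Mathlib
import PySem

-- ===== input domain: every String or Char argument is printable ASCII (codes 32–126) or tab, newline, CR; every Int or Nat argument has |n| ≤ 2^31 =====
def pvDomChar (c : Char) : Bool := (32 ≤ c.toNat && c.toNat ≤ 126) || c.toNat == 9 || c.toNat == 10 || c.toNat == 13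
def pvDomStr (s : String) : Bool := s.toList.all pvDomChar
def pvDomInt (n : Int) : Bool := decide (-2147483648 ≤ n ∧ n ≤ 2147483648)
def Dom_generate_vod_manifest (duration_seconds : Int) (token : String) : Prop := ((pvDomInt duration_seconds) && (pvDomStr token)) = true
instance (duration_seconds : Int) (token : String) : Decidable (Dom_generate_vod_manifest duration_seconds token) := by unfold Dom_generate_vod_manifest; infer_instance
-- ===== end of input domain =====

-- B replaces A's per-iteration min/break loop over ceil-many segments by a divmod decomposition:
-- full segments from duration // 10 plus one optional remainder segment (return value equivalence only).

-- ===== PORT A =====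
-- the for-loop with its per-iteration min and break (f"{seg:.6f}" on an int is str(seg) ++ ".000000")
def pvLoopA (d : Int) (token : String) : List Int → List String → List String
  | [], acc => acc
  | i :: rest, acc =>
      let seg := min 10 (d - i * 10)
      if seg ≤ 0 then acc
      else pvLoopA d token rest
        (acc ++ ["#EXTINF:" ++ PySem.Int.toStr seg ++ ".000000,",
                 "stream" ++ PySem.Int.toStr i ++ ".ts?token=" ++ token])

def generate_vod_manifest (duration_seconds : Int) (token : String) : String :=
  -- math.ceil(duration_seconds / 10) = -((-duration_seconds) // 10); the float division is
  -- exact enough for |n| ≤ 2^31 (relative error ≪ distance to the next integer), so this is exact on Dom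
  let num_segments : Int := -(PySem.Int.floordiv (-duration_seconds) 10)
  let manifest_lines : List String :=
    ["#EXTM3U", "#EXT-X-VERSION:3", "#EXT-X-TARGETDURATION:10", "#EXT-X-PLAYLIST-TYPE:VOD"]
  let manifest_lines := pvLoopA duration_seconds token (PySem.List.pyRange 0 num_segments 1) manifest_lines
  PySem.Str.join "\n" (manifest_lines ++ ["#EXT-X-ENDLIST"])

-- ===== PORT B =====
def generate_vod_manifest_alt (duration_seconds : Int) (token : String) : String :=
  let lines : List String :=
    ["#EXTM3U", "#EXT-X-VERSION:3", "#EXT-X-TARGETDURATION:10", "#EXT-X-PLAYLIST-TYPE:VOD"]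
  let lines :=
    if duration_seconds > 0 then
      let num_full := PySem.Int.floordiv duration_seconds 10
      let remainder := PySem.Int.mod duration_seconds 10
      -- the flattened comprehension of Source B (constant full-segment line, f"{10:.6f}," precomputed)
      let lines := lines ++ (PySem.List.pyRange 0 num_full 1).flatMap (fun i =>
        ["#EXTINF:10.000000,", "stream" ++ PySem.Int.toStr i ++ ".ts?token=" ++ token])
      if remainder > 0 then
        lines ++ ["#EXTINF:" ++ PySem.Int.toStr remainder ++ ".000000,",
                  "stream" ++ PySem.Int.toStr num_full ++ ".ts?token=" ++ token]
      else lines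
    else lines
  PySem.Str.join "\n" (lines ++ ["#EXT-X-ENDLIST"])

-- ===== PRECONDITION & SPEC =====
def Spec_generate_vod_manifest (duration_seconds : Int) (token : String) (out : String) : Prop := out = generate_vod_manifest_alt duration_seconds token
instance (duration_seconds : Int) (token : String) (out : String) : Decidable (Spec_generate_vod_manifest duration_seconds token out) := by unfold Spec_generate_vod_manifest; infer_instance

-- ===== CLAIM (what is proved, stated in full; the proofs are below) =====
def Claim_equal_generate_vod_manifest : Prop := ∀ (duration_seconds : Int) (token : String), Dom_generate_vod_manifest duration_seconds token → Spec_generate_vod_manifest duration_seconds token (generate_vod_manifest duration_seconds token)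

-- ===== LEMMAS AND PROOFS =====

-- A's loop never breaks when every index in the list keeps the remaining duration positive
theorem pvLoopA_eq_flatMap (d : Int) (token : String) :
    ∀ (l : List Int) (acc : List String), (∀ i ∈ l, 0 < d - i * 10) →
      pvLoopA d token l acc =
        acc ++ l.flatMap (fun i =>
          ["#EXTINF:" ++ PySem.Int.toStr (min 10 (d - i * 10)) ++ ".000000,",
           "stream" ++ PySem.Int.toStr i ++ ".ts?token=" ++ token]) := by
  intro l
  induction l with
  | nil => intro acc _; simp [pvLoopA]
  | cons i rest ih =>
      intro acc h
      have hi : 0 < d - i * 10 := h i (by simp)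
      have hseg : ¬ (min 10 (d - i * 10) ≤ 0) := by omega
      simp only [pvLoopA, hseg, if_false]
      rw [ih _ (fun j hj => h j (by simp [hj]))]
      simp

-- ===== VERDICT (by name: the statement is the Claim_ definition above) =====
theorem generate_vod_manifest_spec : Claim_equal_generate_vod_manifest := by
  intro d token _
  unfold Spec_generate_vod_manifest generate_vod_manifest generate_vod_manifest_alt
  by_cases hd : d > 0
  · simp only [hd, if_true]
    set q := PySem.Int.floordiv d 10 with hq
    set r := PySem.Int.mod d 10 with hr
    have hqr : q * 10 + r = d := PySem.Int.floordiv_mul_add_mod d 10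
    have hr0 : 0 ≤ r := PySem.Int.mod_nonneg d (by norm_num)
    have hr10 : r < 10 := PySem.Int.mod_lt d (by norm_num)
    have hq0 : 0 ≤ q := by omega
    -- the ceiling count
    set n : Int := -(PySem.Int.floordiv (-d) 10) with hn
    have hnval : n = if r > 0 then q + 1 else q := by
      by_cases h : r > 0
      · rw [if_pos h, hn, PySem.Int.neg_floordiv_neg_eq_iff_of_pos (by norm_num)]
        omega
      · rw [if_neg h, hn, PySem.Int.neg_floordiv_neg_eq_iff_of_pos (by norm_num)]
        omega
    have hqn : q ≤ n := by rw [hnval]; split_ifs <;> omega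
    have hAline : ∀ i ∈ PySem.List.pyRange 0 n 1, 0 < d - i * 10 := by
      intro i hi
      rw [PySem.List.mem_pyRange_one] at hi
      rw [hnval] at hi
      split_ifs at hi <;> omega
    rw [pvLoopA_eq_flatMap d token _ _ hAline]
    rw [PySem.List.pyRange_one_append 0 q n hq0 hqn]
    rw [List.flatMap_append]
    -- full segments agree: min 10 (d - i*10) = 10 for i < q, and str(10) ++ ".000000" is "10.000000"
    have hten : "#EXTINF:" ++ PySem.Int.toStr 10 ++ ".000000," = "#EXTINF:10.000000," := by decide
    have hfull : (PySem.List.pyRange 0 q 1).flatMap (fun i =>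
          ["#EXTINF:" ++ PySem.Int.toStr (min 10 (d - i * 10)) ++ ".000000,",
           "stream" ++ PySem.Int.toStr i ++ ".ts?token=" ++ token]) =
        (PySem.List.pyRange 0 q 1).flatMap (fun i =>
          ["#EXTINF:10.000000,", "stream" ++ PySem.Int.toStr i ++ ".ts?token=" ++ token]) := by
      simp only [List.flatMap]
      congr 1
      apply List.map_congr_left
      intro i hi
      rw [PySem.List.mem_pyRange_one] at hi
      have hmin : min 10 (d - i * 10) = 10 := by omega
      rw [hmin, hten]
    rw [hfull]
    rcases lt_or_ge 0 r with h | h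
    · have hn' : n = q + 1 := by rw [hnval, if_pos h]
      rw [hn', PySem.List.pyRange_one_singleton, if_pos h]
      have hminr : min 10 (d - q * 10) = r := by omega
      simp [hminr]
    · have hn' : n = q := by rw [hnval, if_neg (by omega)]
      rw [hn', PySem.List.pyRange_one_eq_nil (le_refl q), if_neg (by omega)]
      simp
  · -- d ≤ 0 : the range is empty on the A side, the guard is false on the B side
    have hceil : -(PySem.Int.floordiv (-d) 10) ≤ 0 := by
      have h0 : (0:Int) ≤ PySem.Int.floordiv (-d) 10 := by
        rw [PySem.Int.le_floordiv_iff_mul_le (by norm_num)]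
        omega
      omega
    simp only [hd, if_false]
    rw [PySem.List.pyRange_one_eq_nil hceil]
    simp [pvLoopA]
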